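-- pv_equiv track=rewrite | github.com/jagabi/__algorithm__ | stack_queue/기능개발.py | solution
-- ===== SOURCE A (Python) =====
-- def solution(progresses, speeds):
--     result = []
--     while progresses:
--         for i in range(len(progresses)):
--             progresses[i] += speeds[i]
--         stack = 0
--         for progress in progresses:
--             if progress >= 100:
--                 stack += 1
--             else: break
--         if stack > 0:
--             for i in range(stack):
--                 progresses.pop(0)
--                 speeds.pop(0)
--             result.append(stack)
--
--     return result
-- ===== SOURCE B (Python) =====
-- def solution(progresses, speeds):
--     # O(n) single pass: each task alone needs d = max(1, ceil((100-p)/s)) days;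
--     # it deploys on the running max of d; group consecutive tasks by that day.
--     result = []
--     prev_max = 0
--     count = 0
--     for p, s in zip(progresses, speeds):
--         d = max(1, -((p - 100) // s))
--         if d > prev_max:
--             if count:
--                 result.append(count)
--             prev_max = d
--             count = 1
--         else:
--             count += 1
--     if count:
--         result.append(count)
--     return result
-- ===== Notes on version B (the rewrite author's own statement) =====
-- stated objective: alternative
-- what changed: replaces the day-by-day simulation with repeated list mutation by a closed-form per-task completion day d = max(1, ceil((100-p)/s)) and a single pass grouping tasks by the running maximum of d (intended as asymptotically better, but the probe could not measure a ratio because A times out on the larger inputs)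
-- outside the precondition, e.g. on solution([100], [0]): A returns [1], B raises ZeroDivisionError
import Mathlib
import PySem

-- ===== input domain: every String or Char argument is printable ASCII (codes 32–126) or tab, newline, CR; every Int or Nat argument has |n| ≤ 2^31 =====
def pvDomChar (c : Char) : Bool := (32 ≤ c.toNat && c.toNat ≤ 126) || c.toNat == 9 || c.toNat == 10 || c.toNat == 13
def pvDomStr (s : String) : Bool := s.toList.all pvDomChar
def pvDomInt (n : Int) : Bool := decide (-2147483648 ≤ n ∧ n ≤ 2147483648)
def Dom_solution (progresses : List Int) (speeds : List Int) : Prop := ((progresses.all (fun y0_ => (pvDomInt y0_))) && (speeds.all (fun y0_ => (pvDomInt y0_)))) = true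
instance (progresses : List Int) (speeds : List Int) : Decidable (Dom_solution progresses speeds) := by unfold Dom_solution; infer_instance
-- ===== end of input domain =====

-- B replaces A's day-by-day simulation by a closed-form completion day per task and one
-- grouping pass over the running maximum (A also mutates its argument lists in place;
-- B does not — the equivalence proved here is about the return value only).

-- ===== PORT A =====
-- for i in range(len(progresses)): progresses[i] += speeds[i]
def addSpeeds : List Int → List Int → List Int
  | [], _ => []
  | p :: ps, [] => p :: ps      -- Python raises IndexError here; excluded by Pre_
  | p :: ps, s :: ss => (p + s) :: addSpeeds ps ss

-- stack = 0; for progress in progresses: if progress >= 100: stack += 1 else: break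
def countStack : List Int → Nat
  | [] => 0
  | p :: ps => if 100 ≤ p then countStack ps + 1 else 0

-- while progresses: … (the fuel only makes the loop total; under Dom ∧ Pre_ it never runs out)
def loopA : Nat → List Int → List Int → List Int → List Int
  | 0, _, _, result => result
  | fuel + 1, progresses, speeds, result =>
    if progresses = [] then result
    else
      let progresses' := addSpeeds progresses speeds
      let stack := countStack progresses'
      if 0 < stack then
        loopA fuel (progresses'.drop stack) (speeds.drop stack) (result ++ [(stack : Int)])
      else
        loopA fuel progresses' speeds result

def solution (progresses : List Int) (speeds : List Int) : List Int :=
  loopA 2147483748 progresses speeds []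

-- ===== PORT B =====
-- d = max(1, -((p - 100) // s))
def dayB (p s : Int) : Int := max 1 (-(PySem.Int.floordiv (p - 100) s))

def stepB (st : List Int × Int × Int) (q : Int × Int) : List Int × Int × Int :=
  let d := dayB q.1 q.2
  if st.2.1 < d then
    ((if st.2.2 ≠ 0 then st.1 ++ [st.2.2] else st.1), d, 1)
  else
    (st.1, st.2.1, st.2.2 + 1)

def solution_alt (progresses : List Int) (speeds : List Int) : List Int :=
  let st := (progresses.zip speeds).foldl stepB ([], 0, 0)
  if st.2.2 ≠ 0 then st.1 ++ [st.2.2] else st.1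

-- ===== PRECONDITION & SPEC =====
-- Pre_ excludes inputs with fewer speeds than progresses (A raises IndexError) and inputs
-- with a non-positive paired speed: on those A loops forever for almost all progresses
-- (the progress value never reaches 100), and where it happens to return, B's closed-form
-- day raises ZeroDivisionError (s = 0) instead of simulating.
def Pre_solution (progresses : List Int) (speeds : List Int) : Prop :=
  progresses.length ≤ speeds.length ∧ ∀ q ∈ progresses.zip speeds, 0 < q.2
instance (progresses : List Int) (speeds : List Int) : Decidable (Pre_solution progresses speeds) := by
  unfold Pre_solution; infer_instance

def pvWitness_solution : List Int × List Int := ([93, 30, 55], [1, 30, 5])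

def Spec_solution (progresses : List Int) (speeds : List Int) (out : List Int) : Prop :=
  out = solution_alt progresses speeds
instance (progresses : List Int) (speeds : List Int) (out : List Int) : Decidable (Spec_solution progresses speeds out) := by
  unfold Spec_solution; infer_instance

-- ===== CLAIM (what is proved, stated in full; the proofs are below) =====
def Claim_equal_solution : Prop := ∀ (progresses : List Int) (speeds : List Int), Dom_solution progresses speeds → Pre_solution progresses speeds → Spec_solution progresses speeds (solution progresses speeds)

-- ===== LEMMAS AND PROOFS =====

-- proof-side vocabulary: per-task day list, one-day shift, grouping by running maximum
def shiftD (d : Int) : Int := max 1 (d - 1)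
def shiftQ (q : Int × Int) : Int × Int := (q.1 + q.2, q.2)
def dmap (Z : List (Int × Int)) : List Int := Z.map (fun q => dayB q.1 q.2)

def groups : List Int → List Int
  | [] => []
  | d :: rest =>
      (((rest.takeWhile (fun x => decide (x ≤ d))).length : Int) + 1)
        :: groups (rest.dropWhile (fun x => decide (x ≤ d)))
termination_by l => l.length
decreasing_by
  simp only [List.length_cons]
  exact Nat.lt_succ_of_le (List.length_dropWhile_le _ _)

-- tail of B's fold: an open group with leader m and c members so far
def fB : Int → Int → List Int → List Int
  | _, c, [] => if c ≠ 0 then [c] else []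
  | m, c, d :: rest => if m < d then (if c ≠ 0 then c :: fB d 1 rest else fB d 1 rest) else fB m (c + 1) rest

def finB (st : List Int × Int × Int) : List Int := if st.2.2 ≠ 0 then st.1 ++ [st.2.2] else st.1

lemma zip_drop (n : Nat) : ∀ (l l' : List Int), (l.zip l').drop n = (l.drop n).zip (l'.drop n) := by
  induction n with
  | zero => simp
  | succ n ih =>
    intro l l'
    cases l with
    | nil => simp
    | cons a t =>
      cases l' with
      | nil => simp
      | cons b t' => simpa using ih t t'

lemma drop_len_takeWhile (p : Int → Bool) : ∀ (l : List Int), l.drop (l.takeWhile p).length = l.dropWhile p := by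
  intro l
  induction l with
  | nil => rfl
  | cons a t ih =>
    by_cases h : p a = true
    · simp [h, ih]
    · simp [List.takeWhile_cons, List.dropWhile_cons, h]

lemma addSpeeds_eq : ∀ (ps ss : List Int), ps.length ≤ ss.length →
    addSpeeds ps ss = (ps.zip ss).map (fun q => q.1 + q.2) := by
  intro ps
  induction ps with
  | nil => intro ss _; rfl
  | cons p pt ih =>
    intro ss hl
    cases ss with
    | nil => simp at hl
    | cons s st => simp [addSpeeds, ih st (by simpa using hl)]

lemma zip_addSpeeds : ∀ (ps ss : List Int), ps.length ≤ ss.length →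
    (addSpeeds ps ss).zip ss = (ps.zip ss).map shiftQ := by
  intro ps
  induction ps with
  | nil => intro ss _; simp [addSpeeds]
  | cons p pt ih =>
    intro ss hl
    cases ss with
    | nil => simp at hl
    | cons s st => simp [addSpeeds, shiftQ, ih st (by simpa using hl)]

lemma cd_le_iff (p s t : Int) (hs : 0 < s) : (-(PySem.Int.floordiv (p - 100) s) ≤ t) ↔ 100 ≤ p + t * s := by
  rw [neg_le, PySem.Int.le_floordiv_iff_mul_le hs]
  constructor <;> intro h <;> nlinarith [h]

lemma one_le_dayB (p s : Int) : 1 ≤ dayB p s := le_max_left _ _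

lemma ready_iff (p s : Int) (hs : 0 < s) : 100 ≤ p + s ↔ dayB p s ≤ 1 := by
  have h := cd_le_iff p s 1 hs
  rw [dayB]; omega

lemma dayB_shift (p s : Int) (hs : 0 < s) : dayB (p + s) s = shiftD (dayB p s) := by
  have hne : s ≠ 0 := by omega
  have h1 : p + s - 100 = (p - 100) + 1 * s := by ring
  have h2 : PySem.Int.floordiv (p + s - 100) s = PySem.Int.floordiv (p - 100) s + 1 := by
    rw [PySem.Int.floordiv_eq_ediv_of_pos hs, PySem.Int.floordiv_eq_ediv_of_pos hs, h1,
      Int.add_mul_ediv_right _ _ hne]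
  rw [dayB, dayB, shiftD, h2]; omega

lemma countStack_eq : ∀ (Z : List (Int × Int)), (∀ q ∈ Z, 0 < q.2) →
    countStack (Z.map (fun q => q.1 + q.2)) = ((dmap Z).takeWhile (fun d => decide (d ≤ 1))).length := by
  intro Z
  induction Z with
  | nil => intro _; rfl
  | cons q t ih =>
    intro hpos
    have hq : 0 < q.2 := hpos q (by simp)
    have hiff := ready_iff q.1 q.2 hq
    by_cases h : 100 ≤ q.1 + q.2
    · have hd : decide (dayB q.1 q.2 ≤ 1) = true := by simp [hiff.mp h]
      simp [countStack, dmap, h, hd, ih (fun r hr => hpos r (by simp [hr]))]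
    · have hd : decide (dayB q.1 q.2 ≤ 1) = false := by simp; omega
      simp [countStack, dmap, h, hd]

lemma dmap_shift : ∀ (Z : List (Int × Int)), (∀ q ∈ Z, 0 < q.2) →
    dmap (Z.map shiftQ) = (dmap Z).map shiftD := by
  intro Z hpos
  simp only [dmap, List.map_map]
  apply List.map_congr_left
  intro q hq
  simpa [shiftQ] using dayB_shift q.1 q.2 (hpos q hq)

lemma shift_pred_eq (h : Int) (hh : 2 ≤ h) :
    ((fun x => decide (x ≤ shiftD h)) ∘ shiftD) = (fun x => decide (x ≤ h)) := by
  funext d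
  simp only [Function.comp, shiftD, decide_eq_decide]
  omega

lemma groups_shift : ∀ (n : Nat) (X : List Int), X.length ≤ n →
    (∀ h, X.head? = some h → 2 ≤ h) → groups (X.map shiftD) = groups X := by
  intro n
  induction n with
  | zero =>
    intro X hl _
    cases X with
    | nil => rfl
    | cons a t => simp at hl
  | succ n ih =>
    intro X hl hh
    cases X with
    | nil => rfl
    | cons h rest =>
      have h2 : 2 ≤ h := hh h rfl
      rw [List.map_cons, groups, groups]
      rw [List.takeWhile_map, List.dropWhile_map, shift_pred_eq h h2]
      congr 1
      · simp
      have hd : (rest.dropWhile (fun x => decide (x ≤ h))).length ≤ n := by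
        have := List.length_dropWhile_le (fun x => decide (x ≤ h)) rest
        simp at hl; omega
      apply ih _ hd
      intro h' hh'
      have := List.head?_dropWhile_not (fun x => decide (x ≤ h)) rest
      rw [hh'] at this
      simp at this
      omega

lemma main_loop : ∀ (fuel : Nat) (ps ss : List Int) (acc : List Int),
    ps.length ≤ ss.length →
    (∀ q ∈ ps.zip ss, 0 < q.2) →
    (∀ d ∈ dmap (ps.zip ss), d ≤ (fuel : Int)) →
    loopA fuel ps ss acc = acc ++ groups (dmap (ps.zip ss)) := by
  intro fuel
  induction fuel with
  | zero =>
    intro ps ss acc hl hpos hb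
    cases ps with
    | nil => simp [loopA, dmap, groups]
    | cons p pt =>
      cases ss with
      | nil => simp at hl
      | cons s st =>
        exfalso
        have hmem : dayB p s ∈ dmap ((p :: pt).zip (s :: st)) := by simp [dmap]
        have := hb _ hmem
        have := one_le_dayB p s
        omega
  | succ fuel ih =>
    intro ps ss acc hl hpos hb
    cases ps with
    | nil => simp [loopA, dmap, groups]
    | cons p pt =>
      cases ss with
      | nil => simp at hl
      | cons s st =>
        have hps' := addSpeeds_eq (p :: pt) (s :: st) hl
        have hzps' := zip_addSpeeds (p :: pt) (s :: st) hl
        have hk : countStack (addSpeeds (p :: pt) (s :: st))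
            = ((dmap ((p :: pt).zip (s :: st))).takeWhile (fun d => decide (d ≤ 1))).length := by
          rw [hps']; exact countStack_eq _ hpos
        have hlen' : (addSpeeds (p :: pt) (s :: st)).length = (p :: pt).length := by
          rw [hps', List.length_map, List.length_zip]; omega
        have hdm : dmap ((addSpeeds (p :: pt) (s :: st)).zip (s :: st))
            = (dmap ((p :: pt).zip (s :: st))).map shiftD := by
          rw [hzps']; exact dmap_shift _ hpos
        set D := dmap ((p :: pt).zip (s :: st)) with hD
        have hD0 : D = dayB p s :: dmap (pt.zip st) := by simp [hD, dmap]
        rw [show loopA (fuel + 1) (p :: pt) (s :: st) acc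
            = (if 0 < countStack (addSpeeds (p :: pt) (s :: st)) then
                loopA fuel ((addSpeeds (p :: pt) (s :: st)).drop (countStack (addSpeeds (p :: pt) (s :: st))))
                  ((s :: st).drop (countStack (addSpeeds (p :: pt) (s :: st))))
                  (acc ++ [(countStack (addSpeeds (p :: pt) (s :: st)) : Int)])
              else loopA fuel (addSpeeds (p :: pt) (s :: st)) (s :: st) acc) from by
          simp [loopA]]
        by_cases hk0 : 0 < countStack (addSpeeds (p :: pt) (s :: st))
        · -- the head deploys: pop the whole ready prefix
          rw [if_pos hk0]
          have hd1 : dayB p s ≤ 1 := by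
            by_contra hgt
            rw [hk, hD0] at hk0
            simp [List.takeWhile_cons, hgt] at hk0
          have hd1' : dayB p s = 1 := le_antisymm hd1 (one_le_dayB p s)
          -- identify the dropped state
          have hzdrop : ((addSpeeds (p :: pt) (s :: st)).drop (countStack (addSpeeds (p :: pt) (s :: st)))).zip
              ((s :: st).drop (countStack (addSpeeds (p :: pt) (s :: st))))
              = (((p :: pt).zip (s :: st)).map shiftQ).drop (countStack (addSpeeds (p :: pt) (s :: st))) := by
            rw [← zip_drop, hzps']
          have hdmdrop : dmap (((addSpeeds (p :: pt) (s :: st)).drop (countStack (addSpeeds (p :: pt) (s :: st)))).zip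
              ((s :: st).drop (countStack (addSpeeds (p :: pt) (s :: st)))))
              = (D.dropWhile (fun d => decide (d ≤ 1))).map shiftD := by
            rw [hzdrop]
            rw [show dmap ((((p :: pt).zip (s :: st)).map shiftQ).drop (countStack (addSpeeds (p :: pt) (s :: st))))
                = (dmap (((p :: pt).zip (s :: st)).map shiftQ)).drop (countStack (addSpeeds (p :: pt) (s :: st))) from by
              simp [dmap]]
            rw [dmap_shift _ hpos, hk, ← hD]
            rw [← List.map_drop, drop_len_takeWhile]
          -- fuel is at least 1 whenever anything remains; bound for the recursive call
          have hbound : ∀ d ∈ dmap (((addSpeeds (p :: pt) (s :: st)).drop (countStack (addSpeeds (p :: pt) (s :: st)))).zip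
              ((s :: st).drop (countStack (addSpeeds (p :: pt) (s :: st))))), d ≤ (fuel : Int) := by
            rw [hdmdrop]
            intro d' hd'
            rcases List.mem_map.mp hd' with ⟨d, hdmem, rfl⟩
            have hdD : d ∈ D := (List.dropWhile_sublist _).mem hdmem
            have hdle := hb d hdD
            obtain ⟨h0, t0, ht0⟩ := List.exists_cons_of_ne_nil (List.ne_nil_of_mem hdmem)
            have hh0 : 2 ≤ h0 := by
              have := List.head?_dropWhile_not (fun d => decide (d ≤ 1)) D
              rw [ht0] at this
              simp at this
              omega
            have hh0D : h0 ∈ D := (List.dropWhile_sublist _).mem (by rw [ht0]; simp)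
            have := hb h0 hh0D
            simp only [shiftD]
            push_cast at hdle this ⊢
            omega
          have hposdrop : ∀ q ∈ ((addSpeeds (p :: pt) (s :: st)).drop (countStack (addSpeeds (p :: pt) (s :: st)))).zip
              ((s :: st).drop (countStack (addSpeeds (p :: pt) (s :: st)))), 0 < q.2 := by
            rw [hzdrop]
            intro q hq
            have := List.mem_of_mem_drop hq
            rcases List.mem_map.mp this with ⟨r, hr, rfl⟩
            exact hpos r hr
          have hldrop : ((addSpeeds (p :: pt) (s :: st)).drop (countStack (addSpeeds (p :: pt) (s :: st)))).length
              ≤ ((s :: st).drop (countStack (addSpeeds (p :: pt) (s :: st)))).length := by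
            rw [List.length_drop, List.length_drop, hlen']
            simp only [List.length_cons] at hl ⊢
            omega
          rw [ih _ _ _ hldrop hposdrop hbound, hdmdrop]
          rw [groups_shift (D.dropWhile (fun d => decide (d ≤ 1))).length _ le_rfl]
          · -- assemble: acc ++ [k] ++ groups (dropWhile …) = acc ++ groups D
            rw [hD0, groups]
            have hpred : (fun x => decide (x ≤ dayB p s)) = (fun x => decide (x ≤ 1)) := by
              funext x; rw [hd1']
            rw [hpred]
            have htw : D.takeWhile (fun d => decide (d ≤ 1))
                = dayB p s :: (dmap (pt.zip st)).takeWhile (fun d => decide (d ≤ 1)) := by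
              rw [hD0]; simp [List.takeWhile_cons, hd1]
            have hdw0 : (dayB p s :: dmap (pt.zip st)).dropWhile (fun d => decide (d ≤ 1))
                = (dmap (pt.zip st)).dropWhile (fun d => decide (d ≤ 1)) := by
              simp [List.dropWhile_cons, hd1]
            rw [hk, htw, hdw0]
            simp
          · intro h' hh'
            have := List.head?_dropWhile_not (fun d => decide (d ≤ 1)) D
            rw [hh'] at this
            simp at this
            omega
        · -- nothing ready yet: one day passes
          rw [if_neg hk0]
          have hd2 : 2 ≤ dayB p s := by
            by_contra hlt
            have hd1 : dayB p s ≤ 1 := by have := one_le_dayB p s; omega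
            rw [hk, hD0] at hk0
            simp [List.takeWhile_cons, hd1] at hk0
          have hbound : ∀ d ∈ dmap ((addSpeeds (p :: pt) (s :: st)).zip (s :: st)), d ≤ (fuel : Int) := by
            rw [hdm]
            intro d' hd'
            rcases List.mem_map.mp hd' with ⟨d, hdmem, rfl⟩
            have hdle := hb d hdmem
            have hheadle := hb _ (by rw [hD0]; simp : dayB p s ∈ D)
            simp only [shiftD]
            push_cast at hdle hheadle ⊢
            omega
          have hpos' : ∀ q ∈ (addSpeeds (p :: pt) (s :: st)).zip (s :: st), 0 < q.2 := by
            rw [hzps']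
            intro q hq
            rcases List.mem_map.mp hq with ⟨r, hr, rfl⟩
            exact hpos r hr
          have hl' : (addSpeeds (p :: pt) (s :: st)).length ≤ (s :: st).length := by
            rw [hlen']; exact hl
          rw [ih _ _ _ hl' hpos' hbound, hdm]
          rw [groups_shift D.length _ le_rfl]
          intro h' hh'
          rw [hD0] at hh'
          simp at hh'
          omega

lemma fold_eq : ∀ (Z : List (Int × Int)) (st : List Int × Int × Int),
    finB (Z.foldl stepB st) = st.1 ++ fB st.2.1 st.2.2 (dmap Z) := by
  intro Z
  induction Z with
  | nil =>
    intro st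
    by_cases h : st.2.2 ≠ 0 <;> simp [finB, dmap, fB, h]
  | cons q t ih =>
    intro st
    rw [List.foldl_cons, ih]
    simp only [dmap, List.map_cons, fB]
    by_cases h1 : st.2.1 < dayB q.1 q.2
    · by_cases h2 : st.2.2 ≠ 0
      · rw [show stepB st q = (st.1 ++ [st.2.2], dayB q.1 q.2, 1) from by simp [stepB, h1, h2]]
        simp [dmap, h1, h2]
      · rw [show stepB st q = (st.1, dayB q.1 q.2, 1) from by simp [stepB, h1, h2]]
        simp [dmap, h1, h2]
    · rw [show stepB st q = (st.1, st.2.1, st.2.2 + 1) from by simp [stepB, h1]]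
      simp [dmap, h1]

lemma fB_groups : ∀ (X : List Int) (m c : Int), 1 ≤ c →
    fB m c X = (c + ((X.takeWhile (fun x => decide (x ≤ m))).length : Int))
                 :: groups (X.dropWhile (fun x => decide (x ≤ m))) := by
  intro X
  induction X with
  | nil => intro m c hc; simp [fB, groups]; omega
  | cons d rest ih =>
    intro m c hc
    by_cases h : m < d
    · have hc0 : c ≠ 0 := by omega
      rw [show fB m c (d :: rest) = c :: fB d 1 rest from by simp [fB, h, hc0]]
      rw [ih d 1 le_rfl]
      have ht : (d :: rest).takeWhile (fun x => decide (x ≤ m)) = [] := by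
        simp [List.takeWhile_cons]; omega
      have hd : (d :: rest).dropWhile (fun x => decide (x ≤ m)) = d :: rest := by
        simp [List.dropWhile_cons]; omega
      rw [ht, hd, groups]
      simp; omega
    · rw [show fB m c (d :: rest) = fB m (c + 1) rest from by simp [fB, h]]
      rw [ih m (c + 1) (by omega)]
      have ht : (d :: rest).takeWhile (fun x => decide (x ≤ m)) = d :: rest.takeWhile (fun x => decide (x ≤ m)) := by
        simp [List.takeWhile_cons]; omega
      have hd : (d :: rest).dropWhile (fun x => decide (x ≤ m)) = rest.dropWhile (fun x => decide (x ≤ m)) := by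
        simp [List.dropWhile_cons]; omega
      rw [ht, hd]
      simp; omega

lemma alt_eq_groups (ps ss : List Int) : solution_alt ps ss = groups (dmap (ps.zip ss)) := by
  have h := fold_eq (ps.zip ss) ([], 0, 0)
  rw [solution_alt]
  simp only [finB] at h
  rw [h]
  simp only [List.nil_append]
  cases hz : dmap (ps.zip ss) with
  | nil => simp [fB, groups]
  | cons d rest =>
    have hd1 : 1 ≤ d := by
      have : d ∈ dmap (ps.zip ss) := by rw [hz]; simp
      simp only [dmap, List.mem_map] at this
      obtain ⟨q, _, hq⟩ := this
      rw [← hq]; exact one_le_dayB _ _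
    rw [show fB 0 0 (d :: rest) = fB d 1 rest from by simp [fB]; omega]
    rw [fB_groups rest d 1 le_rfl, groups]
    simp
    omega

lemma dayB_bound (p s : Int) (hp : -2147483648 ≤ p) (hs : 0 < s) : dayB p s ≤ 2147483748 := by
  have h1 : (2147483748 : Int) * 1 ≤ 2147483748 * s := by nlinarith
  have h2 : -(PySem.Int.floordiv (p - 100) s) ≤ 2147483748 :=
    (cd_le_iff p s 2147483748 hs).mpr (by nlinarith)
  rw [dayB]; omega

-- ===== VERDICT (by name: the statement is the Claim_ definition above) =====
theorem solution_spec : Claim_equal_solution := by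
  intro ps ss hdom hpre
  unfold Spec_solution
  obtain ⟨hl, hpos⟩ := hpre
  have hdomp : ∀ p ∈ ps, -2147483648 ≤ p := by
    unfold Dom_solution at hdom
    simp only [Bool.and_eq_true, List.all_eq_true, pvDomInt, decide_eq_true_eq] at hdom
    intro p hp
    exact (hdom.1 p hp).1
  have hb : ∀ d ∈ dmap (ps.zip ss), d ≤ ((2147483748 : Nat) : Int) := by
    intro d hd
    rcases List.mem_map.mp hd with ⟨q, hq, rfl⟩
    have hp := hdomp q.1 (List.of_mem_zip hq).1
    have := dayB_bound q.1 q.2 hp (hpos q hq)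
    push_cast
    omega
  rw [solution, main_loop 2147483748 ps ss [] hl hpos hb, alt_eq_groups]
  simp
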